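-- pv_equiv track=rewrite | github.com/Aseamann/TRain | 05_Analysis/DataDepot.py | get_peptide_inter
-- ===== SOURCE A (Python) =====
-- def get_peptide_inter(chains, interactions, chain_in):
--     peptide = []
--     aa_inter = {}
--     for AA_Peptide in chains[chain_in]:
--         peptide.append(AA_Peptide)
--     for each in peptide:
--         if each[0] in aa_inter.keys():
--             aa_inter[each[0]].append(interactions[each[0]])
--         else:
--             aa_inter[each[0]] = [interactions[each[0]]]
--     return aa_inter
-- ===== SOURCE B (Python) =====
-- def get_peptide_inter(chains, interactions, chain_in):
--     def go(items):
--         if not items: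
--             return {}
--         k = items[0][0]
--         same = [e for e in items if e[0] == k]
--         rest = [e for e in items[1:] if e[0] != k]
--         out = {k: [interactions[k]] * len(same)}
--         out.update(go(rest))
--         return out
--     return go(chains[chain_in])
-- ===== Notes on version B (the rewrite author's own statement) =====
-- stated objective: alternative
-- what changed: Replaces A's single-pass dict accumulation (membership test + append per residue) with a recursive partition: take the first residue's key, collect its whole group with one filter, and recurse on the remainder with that key removed.
import Mathlib
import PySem

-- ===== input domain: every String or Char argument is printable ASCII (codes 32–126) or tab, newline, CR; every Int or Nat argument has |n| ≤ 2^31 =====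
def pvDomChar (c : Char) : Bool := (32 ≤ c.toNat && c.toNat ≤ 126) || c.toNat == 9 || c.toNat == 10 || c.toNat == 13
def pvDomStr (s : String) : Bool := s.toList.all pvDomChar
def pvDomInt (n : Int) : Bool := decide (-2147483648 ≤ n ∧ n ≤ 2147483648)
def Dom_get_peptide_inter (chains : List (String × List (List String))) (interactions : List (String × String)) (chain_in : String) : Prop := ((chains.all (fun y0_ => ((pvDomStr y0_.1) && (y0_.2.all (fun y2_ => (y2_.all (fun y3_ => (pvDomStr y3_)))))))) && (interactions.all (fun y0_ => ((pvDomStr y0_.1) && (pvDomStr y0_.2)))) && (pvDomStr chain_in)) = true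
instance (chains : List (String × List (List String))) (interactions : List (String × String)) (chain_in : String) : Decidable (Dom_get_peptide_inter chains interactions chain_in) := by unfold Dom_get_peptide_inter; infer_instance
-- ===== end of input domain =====

-- B replaces A's single-pass dict-accumulation with a recursive partition: take the first
-- residue's key, collect that key's whole group by one filter, and recurse on the remainder
-- with the key removed — an alternative decomposition, proved to return the same dict.

-- ===== PORT A =====
-- Literal port of A: copy chains[chain_in] into `peptide`, then group by each[0] with a
-- membership test, appending interactions[each[0]] (dict as PySem.Dict, returned as items).
def get_peptide_inter (chains : List (String × List (List String))) (interactions : List (String × String)) (chain_in : String) : List (String × List String) :=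
  let cd := PySem.Dict.ofList chains
  let idict := PySem.Dict.ofList interactions
  let peptide := ((cd.get? chain_in).getD []).foldl (fun acc x => acc ++ [x]) []
  let aa_inter := peptide.foldl (fun d each =>
    let k := (PySem.List.pyGet? each 0).getD ""      -- each[0]; Pre_ guarantees the index exists
    if d.contains k then
      d.modify k [] (fun l => l ++ [idict.getD k ""]) -- aa_inter[k].append(interactions[k])
    else
      d.insert k [idict.getD k ""]) PySem.Dict.empty  -- aa_inter[k] = [interactions[k]]
  aa_inter.items

-- ===== PORT B =====
-- Literal port of Source B's recursive helper `go`: empty → {}; else k = items[0][0],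
-- same = items filtered to key k, rest = items[1:] with key k removed, and the result is
-- {k: [interactions[k]] * len(same)} followed by go(rest) (rest's keys are all ≠ k, so
-- out.update(go(rest)) appends those entries after k: rendered as cons on the items list).
def pvGo (idict : PySem.Dict String String) : List (List String) → List (String × List String)
  | [] => []
  | e :: es =>
    let k := (PySem.List.pyGet? e 0).getD ""
    let same := (e :: es).filter (fun x => ((PySem.List.pyGet? x 0).getD "") == k)
    let rest := es.filter (fun x => !(((PySem.List.pyGet? x 0).getD "") == k))
    (k, List.replicate same.length (idict.getD k "")) :: pvGo idict rest
  termination_by l => l.length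
  decreasing_by
    simp only [List.length_cons, List.length_unattach]
    exact Nat.lt_succ_of_le (le_trans (List.length_filter_le _ _) (by simp))

def get_peptide_inter_alt (chains : List (String × List (List String))) (interactions : List (String × String)) (chain_in : String) : List (String × List String) :=
  pvGo (PySem.Dict.ofList interactions) (((PySem.Dict.ofList chains).get? chain_in).getD [])

-- ===== PRECONDITION & SPEC =====
-- Pre_ excludes exactly the inputs where Python A raises: a chain_in missing from chains
-- (KeyError), an empty residue list (IndexError on each[0]) or a key missing from
-- interactions (KeyError).
def Pre_get_peptide_inter (chains : List (String × List (List String))) (interactions : List (String × String)) (chain_in : String) : Prop :=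
  (PySem.Dict.ofList chains).contains chain_in = true ∧
  ∀ each ∈ (((PySem.Dict.ofList chains).get? chain_in).getD []),
    each ≠ [] ∧ (PySem.Dict.ofList interactions).contains ((PySem.List.pyGet? each 0).getD "") = true
instance (chains : List (String × List (List String))) (interactions : List (String × String)) (chain_in : String) : Decidable (Pre_get_peptide_inter chains interactions chain_in) := by unfold Pre_get_peptide_inter; infer_instance

def pvWitness_get_peptide_inter : (List (String × List (List String))) × (List (String × String)) × String :=
  ([("A", [["a", "x"], ["b", "y"], ["a", "z"]])], [("a", "p"), ("b", "q")], "A")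

def Spec_get_peptide_inter (chains : List (String × List (List String))) (interactions : List (String × String)) (chain_in : String) (out : List (String × List String)) : Prop := out = get_peptide_inter_alt chains interactions chain_in
instance (chains : List (String × List (List String))) (interactions : List (String × String)) (chain_in : String) (out : List (String × List String)) : Decidable (Spec_get_peptide_inter chains interactions chain_in out) := by unfold Spec_get_peptide_inter; infer_instance

-- ===== CLAIM (what is proved, stated in full; the proofs are below) =====
def Claim_equal_get_peptide_inter : Prop := ∀ (chains : List (String × List (List String))) (interactions : List (String × String)) (chain_in : String), Dom_get_peptide_inter chains interactions chain_in → Pre_get_peptide_inter chains interactions chain_in → Spec_get_peptide_inter chains interactions chain_in (get_peptide_inter chains interactions chain_in)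

-- ===== LEMMAS AND PROOFS =====

-- copying a list element by element (A's first loop) is the identity
theorem pv_copy_eq {α : Type} (l acc : List α) : l.foldl (fun acc x => acc ++ [x]) acc = acc ++ l := by
  induction l generalizing acc with
  | nil => simp
  | cons x xs ih => simp [List.foldl, ih]

-- A's branch on membership is exactly a 'modify with default []' step
theorem pv_step_eq (d : PySem.Dict String (List String)) (k : String) (v : String) :
    (if d.contains k then d.modify k [] (fun l => l ++ [v]) else d.insert k [v]) =
    d.modify k [] (fun l => l ++ [v]) := by
  by_cases h : d.contains k = true
  · simp [h]
  · simp [h, PySem.Dict.modify,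
      PySem.Dict.getD_of_not_contains (h := by simpa using h)]

theorem pv_items_modify (pairs : List (String × String)) :
    ((pairs.foldl (fun d p => d.modify p.1 [] (fun l => l ++ [p.2])) PySem.Dict.empty).items) =
    (PySem.Set.ofList (pairs.map (·.1))).map
      (fun k => (k, (pairs.filter (fun p => p.1 == k)).map (·.2))) := by
  rw [PySem.Dict.items_eq_map_keys _ ?nd []]
  case nd =>
    exact PySem.Dict.nodup_keys_foldl_modify_key pairs (·.1) [] (fun d p => (fun l => l ++ [p.2])) _ (by simp [PySem.Dict.keys_empty])
  rw [PySem.Dict.keys_foldl_modify_key]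
  simp only [PySem.Dict.keys_empty, PySem.Set.update_nil_left]
  apply List.map_congr_left
  intro k hk
  rw [PySem.Dict.getD_foldl_modify_append]
  simp [PySem.Dict.getD_empty]

theorem pv_group (lst : List (List String)) (idict : PySem.Dict String String) (k : String) :
    List.map (fun p => p.2) (List.filter (fun p => p.1 == k)
      (lst.map (fun e => (((PySem.List.pyGet? e 0).getD "" : String), idict.getD ((PySem.List.pyGet? e 0).getD "") "")))) =
    List.replicate (List.count k (lst.map (fun e => ((PySem.List.pyGet? e 0).getD "" : String)))) (idict.getD k "") := by
  induction lst with
  | nil => simp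
  | cons e es ih =>
    by_cases h : ((PySem.List.pyGet? e 0).getD "" : String) = k
    · simp [h, ih, List.replicate_succ]
    · simp [h, ih]

-- dedup (keep-first occurrences) commutes with filter
theorem pv_ofList_filter (ys : List String) (p : String → Bool) :
    PySem.Set.ofList (ys.filter p) = (PySem.Set.ofList ys).filter p := by
  induction ys with
  | nil => simp [PySem.Set.ofList_nil]
  | cons y ys ih =>
    by_cases h : p y = true
    · rw [List.filter_cons_of_pos h, PySem.Set.ofList_cons, PySem.Set.ofList_cons,
        List.filter_cons_of_pos h, PySem.Set.discard, PySem.Set.discard, ih,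
        List.filter_filter, List.filter_filter]
      congr 1
      apply List.filter_congr
      intro x _
      simp [Bool.and_comm]
    · rw [List.filter_cons_of_neg h, PySem.Set.ofList_cons,
        List.filter_cons_of_neg h, PySem.Set.discard, ih, List.filter_filter]
      apply List.filter_congr
      intro x _
      by_cases hx : x = y
      · simp [hx, Bool.eq_false_iff.mpr (fun hc => h hc)]
      · simp [hx]

-- B's recursive partition computes distinct keys in first-appearance order with replicated values
theorem pv_go_eq (idict : PySem.Dict String String) (lst : List (List String)) :
    pvGo idict lst =
    (PySem.Set.ofList (lst.map (fun e => ((PySem.List.pyGet? e 0).getD "" : String)))).map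
      (fun k => (k, List.replicate (List.count k (lst.map (fun e => ((PySem.List.pyGet? e 0).getD "" : String)))) (idict.getD k ""))) := by
  induction lst using pvGo.induct with
  | case1 => simp [pvGo, PySem.Set.ofList_nil]
  | case2 e es k same ih =>
    rw [pvGo]
    have hsame : same = es.filter (fun x => !((PySem.List.pyGet? x 0).getD "" == (PySem.List.pyGet? e 0).getD "")) := by
      simp only [same]; rw [List.unattach_filter, List.unattach_attach]
      intro x h; rfl
    rw [hsame] at ih
    rw [ih]
    rw [List.map_cons, PySem.Set.ofList_cons, PySem.Set.discard,
      ← pv_ofList_filter, List.filter_map, List.map_cons]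
    simp only [Function.comp_def]
    congr 1
    · congr 2
      rw [List.filter_cons_of_pos (by simp), List.count_cons_self, List.length_cons]
      congr 1
      rw [List.count, List.countP_map, List.countP_eq_length_filter]
      rfl
    · apply List.map_congr_left
      intro k' hk'
      have hne : k' ≠ (PySem.List.pyGet? e 0).getD "" := by
        rw [PySem.Set.mem_ofList] at hk'
        obtain ⟨x, hx, rfl⟩ := List.mem_map.mp hk'
        have := (List.mem_filter.mp hx).2
        simpa using this
      congr 2
      have hmap : List.map (fun e => ((PySem.List.pyGet? e 0).getD "" : String))
          (List.filter (fun x => !(PySem.List.pyGet? x 0).getD "" == (PySem.List.pyGet? e 0).getD "") es) =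
          (List.map (fun e => ((PySem.List.pyGet? e 0).getD "" : String)) es).filter
            (fun y => !(y == (PySem.List.pyGet? e 0).getD "")) := by
        rw [List.filter_map]; rfl
      rw [hmap, List.count_filter (by simpa using hne), List.count_cons_of_ne hne.symm]

theorem get_peptide_inter_spec : Claim_equal_get_peptide_inter := by
  intro chains interactions chain_in _ _
  unfold Spec_get_peptide_inter get_peptide_inter get_peptide_inter_alt
  simp only [pv_copy_eq, List.nil_append]
  rw [pv_go_eq]
  -- A side: rewrite to the same shape
  have hA : ∀ (lst : List (List String)) (idict : PySem.Dict String String),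
      ((lst.foldl (fun d each =>
          let k := (PySem.List.pyGet? each 0).getD ""
          if d.contains k then d.modify k [] (fun l => l ++ [idict.getD k ""])
          else d.insert k [idict.getD k ""]) PySem.Dict.empty).items : List (String × List String)) =
      (PySem.Set.ofList (lst.map (fun e => ((PySem.List.pyGet? e 0).getD "" : String)))).map
        (fun k => (k, List.replicate (List.count k (lst.map (fun e => ((PySem.List.pyGet? e 0).getD "" : String)))) (idict.getD k ""))) := by
    intro lst idict
    have h1 : (lst.foldl (fun d each =>
          let k := (PySem.List.pyGet? each 0).getD ""
          if d.contains k then d.modify k [] (fun l => l ++ [idict.getD k ""])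
          else d.insert k [idict.getD k ""]) PySem.Dict.empty) =
        ((lst.map (fun e => (((PySem.List.pyGet? e 0).getD "" : String),
            idict.getD ((PySem.List.pyGet? e 0).getD "") ""))).foldl
          (fun d p => d.modify p.1 [] (fun l => l ++ [p.2])) PySem.Dict.empty) := by
      rw [List.foldl_map]; simp only [pv_step_eq]
    rw [h1, pv_items_modify, List.map_map]
    apply List.map_congr_left
    intro k hk
    rw [pv_group]
  exact hA _ _
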